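-- pv_equiv track=rewrite | github.com/nikomayra/places-central-zoner | backend/app/services/cluster_service.py | refine_clusters
-- ===== SOURCE A (Python) =====
-- from itertools import combinations
--
-- def refine_clusters(labels, places, place_types):
--     clusters = {i: [] for i in range(max(labels) + 1)}
--
--     # Organize points into clusters
--     for label, place in zip(labels, places):
--         clusters[label].append(place)
--
--     refined_clusters = []
--     for combo in combinations(clusters.keys(), len(place_types)):
--         combined_cluster = []
--         type_counts = {place_type: 0 for place_type in place_types}
--
--         for label in combo:
--             for point in clusters[label]:
--                 if type_counts[point['name']] < 1:
--                     combined_cluster.append(point)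
--                     type_counts[point['name']] += 1
--
--         if all(count >= 1 for count in type_counts.values()):
--             refined_clusters.append(combined_cluster)
--
--     return refined_clusters
-- ===== SOURCE B (Python) =====
-- def refine_clusters(labels, places, place_types):
--     n = max(labels) + 1
--     buckets = [[] for _ in range(n)]
--     for label, place in zip(labels, places):
--         buckets[label].append(place)
--
--     result = []
--
--     # Depth-first backtracking over clusters: at each index choose include/skip,
--     # carrying the partially combined list and the set of covered types, so
--     # shared combination prefixes are scanned once instead of once per combo.
--     def dfs(i, remaining, combined, seen):
--         if remaining == 0:
--             if all(t in seen for t in place_types):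
--                 result.append(list(combined))
--             return
--         if n - i < remaining:
--             return
--         # include cluster i
--         added = []
--         for p in buckets[i]:
--             t = p['name']
--             if t not in seen:
--                 seen.add(t)
--                 combined.append(p)
--                 added.append(t)
--         dfs(i + 1, remaining - 1, combined, seen)
--         for t in added:
--             seen.remove(t)
--             combined.pop()
--         # skip cluster i
--         dfs(i + 1, remaining, combined, seen)
--
--     dfs(0, len(place_types), [], set())
--     return result
-- ===== Notes on version B (the rewrite author's own statement) =====
-- stated objective: alternative
-- what changed: A enumerates all k-combinations via itertools and, for each, re-scans every point of every chosen cluster with a fresh type-count dict; B replaces that scheme by one depth-first backtracking pass over the clusters that extends and undoes a shared combined list and seen-type set, so combination prefixes are scanned once instead of once per combination.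
import Mathlib
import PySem

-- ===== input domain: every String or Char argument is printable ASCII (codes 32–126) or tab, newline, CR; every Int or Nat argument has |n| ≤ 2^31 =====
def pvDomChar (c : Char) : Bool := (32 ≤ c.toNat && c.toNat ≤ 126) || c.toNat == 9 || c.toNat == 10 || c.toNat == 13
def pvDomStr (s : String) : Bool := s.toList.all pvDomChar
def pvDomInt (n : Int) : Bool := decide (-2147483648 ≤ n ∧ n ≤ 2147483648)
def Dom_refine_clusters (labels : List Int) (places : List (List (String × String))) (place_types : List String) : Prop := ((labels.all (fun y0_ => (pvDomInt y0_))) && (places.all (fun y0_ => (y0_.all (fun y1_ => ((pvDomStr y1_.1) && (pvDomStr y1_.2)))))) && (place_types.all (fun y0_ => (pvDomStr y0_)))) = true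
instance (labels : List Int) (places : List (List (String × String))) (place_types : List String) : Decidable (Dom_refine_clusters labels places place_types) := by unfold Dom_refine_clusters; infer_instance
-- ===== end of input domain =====

-- B replaces A's "enumerate all k-combinations, re-scanning every point of every chosen
-- cluster from scratch" by a single depth-first backtracking pass over the clusters that
-- extends and undoes a shared combined list / seen-type set, so combination prefixes are
-- scanned once; the return value is proved identical on Pre_.

abbrev Pt : Type := List (String × String)

-- point['name'] : first-match lookup in the point's association list ("" never
-- reached under Pre_, where Python would raise KeyError)
def pname (p : Pt) : String := (PySem.Dict.mk p).getD "name" ""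

-- itertools.combinations(xs, k), in itertools order (used by Python A)
def pyCombinations {α : Type} : List α → Nat → List (List α)
  | _, 0 => [[]]
  | [], _ + 1 => []
  | x :: xs, k + 1 => (pyCombinations xs k).map (fun c => x :: c) ++ pyCombinations xs (k + 1)

-- ===== PORT A =====

-- clusters = {i: [] for i in range(max(labels)+1)}; then clusters[label].append(place)
def clustersOf (labels : List Int) (places : List Pt) : PySem.Dict Int (List Pt) :=
  (labels.zip places).foldl (fun d lp => d.modify lp.1 [] (fun ps => ps ++ [lp.2]))
    ((PySem.List.pyRange 0 ((PySem.List.max? labels (fun x => x)).getD 0 + 1)).foldl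
      (fun d i => d.insert i []) PySem.Dict.empty)

-- body of A's inner double loop
def aStep (st : List Pt × PySem.Dict String Int) (point : Pt) : List Pt × PySem.Dict String Int :=
  if st.2.getD (pname point) 0 < 1 then
    (st.1 ++ [point], st.2.modify (pname point) 0 (fun c => c + 1))
  else st

-- one combo: combined_cluster and type_counts after the double loop
def aCombo (clusters : PySem.Dict Int (List Pt)) (place_types : List String) (combo : List Int) :
    List Pt × PySem.Dict String Int :=
  combo.foldl (fun st label => (clusters.getD label []).foldl aStep st)
    ([], place_types.foldl (fun d t => d.insert t 0) PySem.Dict.empty)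

def refine_clusters (labels : List Int) (places : List (List (String × String))) (place_types : List String) : List (List (List (String × String))) :=
  let clusters := clustersOf labels places
  (pyCombinations clusters.keys place_types.length).foldl (fun refined combo =>
    let st := aCombo clusters place_types combo
    if st.2.values.all (fun c => decide (1 ≤ c)) then refined ++ [st.1] else refined) []

-- ===== PORT B =====

-- buckets = [[] for _ in range(n)]; buckets[label].append(place)
def bucketsOf (labels : List Int) (places : List Pt) (n : Int) : List (List Pt) :=
  (labels.zip places).foldl
    (fun bs lp => PySem.List.pySetD bs lp.1 (PySem.List.pyGetD bs lp.1 [] ++ [lp.2]))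
    (List.replicate n.toNat [])

-- Source B's include-scan of one point: t = p['name']; if t not in seen: append & mark
def bScanStep (st : List Pt × PySem.Set String) (p : Pt) : List Pt × PySem.Set String :=
  if st.2.contains (pname p) then st else (st.1 ++ [p], st.2.add (pname p))

-- Source B's dfs; the backtracking (undoing `added`) is the functional reuse of
-- combined/seen in the skip branch.  Nat subtraction in the guard is exact: in Source B
-- i ≤ n and remaining ≥ 0 always hold on reachable calls (and when n < 0 the guard
-- fires at once on both sides), so `n - i < remaining` agrees with the Nat form.
def dfsB (buckets : List (List Pt)) (pts : List String) :
    Nat → Nat → List Pt → PySem.Set String → List (List Pt) → List (List Pt)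
  | i, remaining, combined, seen, acc =>
    if remaining = 0 then
      (if pts.all (fun t => seen.contains t) then acc ++ [combined] else acc)
    else if _h : buckets.length - i < remaining then acc
    else
      let st := (buckets.getD i []).foldl bScanStep (combined, seen)
      dfsB buckets pts (i + 1) remaining combined seen
        (dfsB buckets pts (i + 1) (remaining - 1) st.1 st.2 acc)
  termination_by i remaining => (buckets.length - i) + remaining
  decreasing_by all_goals omega

def refine_clusters_alt (labels : List Int) (places : List (List (String × String))) (place_types : List String) : List (List (List (String × String))) :=
  let n : Int := (PySem.List.max? labels (fun x => x)).getD 0 + 1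
  let buckets := bucketsOf labels places n
  dfsB buckets place_types 0 place_types.length [] PySem.Set.empty []

-- ===== PRECONDITION & SPEC =====
-- Pre_ excludes exactly the inputs where Python A raises: empty labels (ValueError
-- from max), a negative label (KeyError), and — only when 1 ≤ len(place_types) ≤
-- max(labels)+1, i.e. when some combination actually consumes points — a zipped
-- place without a 'name' key or whose name is not a place type (KeyError).
-- A negative label raises only when it is paired with a place by zip, hence the take.
def Pre_refine_clusters (labels : List Int) (places : List (List (String × String))) (place_types : List String) : Prop :=
  labels ≠ [] ∧ (∀ l ∈ labels.take places.length, 0 ≤ l) ∧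
  ((1 ≤ place_types.length ∧ (place_types.length : Int) ≤ (PySem.List.max? labels (fun x => x)).getD 0 + 1) →
    ∀ p ∈ places.take labels.length, ∃ t ∈ place_types, (PySem.Dict.mk p).get? "name" = some t)
instance (labels : List Int) (places : List (List (String × String))) (place_types : List String) : Decidable (Pre_refine_clusters labels places place_types) := by unfold Pre_refine_clusters; infer_instance

def pvWitness_refine_clusters : List Int × (List (List (String × String))) × List String :=
  ([0, 1, 0], [[("name", "bar")], [("name", "cafe")], [("name", "cafe")]], ["bar", "cafe"])

def Spec_refine_clusters (labels : List Int) (places : List (List (String × String))) (place_types : List String) (out : List (List (List (String × String)))) : Prop := out = refine_clusters_alt labels places place_types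
instance (labels : List Int) (places : List (List (String × String))) (place_types : List String) (out : List (List (List (String × String)))) : Decidable (Spec_refine_clusters labels places place_types out) := by unfold Spec_refine_clusters; infer_instance

-- ===== CLAIM (what is proved, stated in full; the proofs are below) =====
def Claim_equal_refine_clusters : Prop := ∀ (labels : List Int) (places : List (List (String × String))) (place_types : List String), Dom_refine_clusters labels places place_types → Pre_refine_clusters labels places place_types → Spec_refine_clusters labels places place_types (refine_clusters labels places place_types)

-- ===== LEMMAS AND PROOFS =====

-- invariant linking A's type_counts dict to B's seen set
def InvTS (place_types : List String) (tc : PySem.Dict String Int) (seen : PySem.Set String) : Prop :=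
  tc.keys.Nodup ∧ (∀ t ∈ place_types, t ∈ tc.keys) ∧ (∀ t, 0 ≤ tc.getD t 0) ∧
  (∀ t, 1 ≤ tc.getD t 0 ↔ t ∈ seen) ∧ (∀ t ∈ tc.keys, t ∈ place_types ∨ t ∈ seen)

def RelST (place_types : List String) (sA : List Pt × PySem.Dict String Int)
    (sB : List Pt × PySem.Set String) : Prop :=
  sA.1 = sB.1 ∧ InvTS place_types sA.2 sB.2

theorem getD_foldl_insert_zero (l : List String) (d : PySem.Dict String Int)
    (h : ∀ t, d.getD t 0 = 0) : ∀ t, (l.foldl (fun d t => d.insert t 0) d).getD t 0 = 0 := by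
  induction l generalizing d with
  | nil => exact h
  | cons x xs ih =>
    simp only [List.foldl_cons]
    refine ih _ (fun t => ?_)
    rw [PySem.Dict.getD_insert]
    split <;> simp [h]

theorem mem_keys_foldl_insert_zero (l : List String) (d : PySem.Dict String Int) (t : String) :
    t ∈ (l.foldl (fun d t => d.insert t 0) d).keys ↔ t ∈ d.keys ∨ t ∈ l := by
  induction l generalizing d with
  | nil => simp
  | cons x xs ih =>
    simp only [List.foldl_cons, ih, PySem.Dict.mem_keys_insert, List.mem_cons]
    tauto

theorem nodup_keys_foldl_insert_zero (l : List String) (d : PySem.Dict String Int)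
    (h : d.keys.Nodup) : (l.foldl (fun d t => d.insert t 0) d).keys.Nodup := by
  induction l generalizing d with
  | nil => exact h
  | cons x xs ih =>
    simp only [List.foldl_cons]
    exact ih _ (PySem.Dict.nodup_keys_insert _ _ _ h)

theorem invTS_init (pts : List String) :
    InvTS pts (pts.foldl (fun d t => d.insert t 0) PySem.Dict.empty) PySem.Set.empty := by
  have hzero := getD_foldl_insert_zero pts PySem.Dict.empty (fun t => by
    simp [PySem.Dict.getD_empty])
  refine ⟨?_, ?_, ?_, ?_, ?_⟩
  · exact nodup_keys_foldl_insert_zero pts _ PySem.Dict.nodup_keys_empty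
  · intro t ht
    rw [mem_keys_foldl_insert_zero]
    exact Or.inr ht
  · intro t; rw [hzero]
  · intro t; rw [hzero]; simp [PySem.Set.empty]
  · intro t ht
    rw [mem_keys_foldl_insert_zero] at ht
    rcases ht with h | h
    · simp [PySem.Dict.keys_empty] at h
    · exact Or.inl h

theorem relst_step (pts : List String) {sA : List Pt × PySem.Dict String Int}
    {sB : List Pt × PySem.Set String} (h : RelST pts sA sB) (p : Pt) :
    RelST pts (aStep sA p) (bScanStep sB p) := by
  obtain ⟨hacc, hnd, hmem, hpos, hiff, hcov⟩ := h
  have hcontm : sB.2.contains (pname p) = true ↔ pname p ∈ sB.2 := by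
    simp [PySem.Set.contains]
  by_cases hc : 1 ≤ sA.2.getD (pname p) 0
  · have hA : aStep sA p = sA := by unfold aStep; rw [if_neg (by omega)]
    have hB : bScanStep sB p = sB := by
      unfold bScanStep
      rw [if_pos (hcontm.mpr ((hiff (pname p)).mp hc))]
    rw [hA, hB]; exact ⟨hacc, hnd, hmem, hpos, hiff, hcov⟩
  · have hnm : pname p ∉ sB.2 := fun hin => hc ((hiff (pname p)).mpr hin)
    have hA : aStep sA p = (sA.1 ++ [p], sA.2.modify (pname p) 0 (fun c => c + 1)) := by
      unfold aStep; rw [if_pos (by omega)]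
    have hB : bScanStep sB p = (sB.1 ++ [p], sB.2.add (pname p)) := by
      unfold bScanStep
      rw [if_neg (by simpa using fun hin => hnm (hcontm.mp hin))]
    rw [hA, hB]
    refine ⟨by rw [hacc], ?_, ?_, ?_, ?_, ?_⟩
    · rw [PySem.Dict.keys_modify]
      exact PySem.Dict.nodup_keys_insert _ _ _ hnd
    · intro t ht
      rw [PySem.Dict.keys_modify, PySem.Dict.mem_keys_insert]
      exact Or.inr (hmem t ht)
    · intro t
      rw [PySem.Dict.getD_modify]
      split
      · have := hpos (pname p); omega
      · exact hpos t
    · intro t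
      rw [PySem.Dict.getD_modify, PySem.Set.mem_add]
      split
      · rename_i heq
        have := hpos (pname p)
        constructor
        · intro _; exact Or.inr heq
        · intro _; omega
      · rename_i hne
        rw [hiff t]
        constructor
        · exact Or.inl
        · rintro (h | h)
          · exact h
          · exact absurd h hne
    · intro t ht
      rw [PySem.Dict.keys_modify, PySem.Dict.mem_keys_insert] at ht
      rcases ht with h | h
      · right; rw [PySem.Set.mem_add]; exact Or.inr h
      · rcases hcov t h with h2 | h2
        · exact Or.inl h2
        · right; rw [PySem.Set.mem_add]; exact Or.inl h2

theorem relst_points (pts : List String) (l : List Pt) {sA : List Pt × PySem.Dict String Int}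
    {sB : List Pt × PySem.Set String} (h : RelST pts sA sB) :
    RelST pts (l.foldl aStep sA) (l.foldl bScanStep sB) := by
  induction l generalizing sA sB with
  | nil => exact h
  | cons p ps ih =>
    simp only [List.foldl_cons]
    exact ih (relst_step pts h p)

theorem invTS_final (pts : List String) {tc : PySem.Dict String Int} {seen : PySem.Set String}
    (h : InvTS pts tc seen) :
    tc.values.all (fun c => decide (1 ≤ c)) = pts.all (fun t => seen.contains t) := by
  obtain ⟨hnd, hmem, hpos, hiff, hcov⟩ := h
  rw [PySem.Dict.values_eq_map_keys tc hnd 0, List.all_map, Bool.eq_iff_iff,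
    List.all_eq_true, List.all_eq_true]
  constructor
  · intro h t ht
    have h1 := h t (hmem t ht)
    simp only [Function.comp, decide_eq_true_eq] at h1
    simp [PySem.Set.contains, (hiff t).mp h1]
  · intro h t ht
    simp only [Function.comp, decide_eq_true_eq]
    rcases hcov t ht with h2 | h2
    · have := h t h2
      simp only [PySem.Set.contains] at this
      exact (hiff t).mpr (by simpa using this)
    · exact (hiff t).mpr h2

theorem pyCombinations_eq_nil {α : Type} {l : List α} {k : Nat} (h : l.length < k) :
    pyCombinations l k = [] := by
  induction l, k using pyCombinations.induct with
  | case1 l => omega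
  | case2 k => rfl
  | case3 x xs k ih1 ih2 =>
    simp only [List.length_cons] at h
    simp only [pyCombinations, List.append_eq_nil_iff, List.map_eq_nil_iff]
    exact ⟨ih1 (by omega), ih2 (by omega)⟩

theorem pyCombinations_map {α β : Type} (f : α → β) (l : List α) (k : Nat) :
    pyCombinations (l.map f) k = (pyCombinations l k).map (List.map f) := by
  induction l, k using pyCombinations.induct with
  | case1 l => simp [pyCombinations]
  | case2 k => simp [pyCombinations]
  | case3 x xs k ih1 ih2 =>
    simp only [List.map_cons, pyCombinations, ih1, ih2, List.map_append, List.map_map]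
    rfl

theorem keys_foldl_insert_nil (l : List Int) (d : PySem.Dict Int (List Pt))
    (h : ∀ i ∈ l, d.contains i = false) (hnd : l.Nodup) :
    (l.foldl (fun d i => d.insert i []) d).keys = d.keys ++ l := by
  induction l generalizing d with
  | nil => simp
  | cons x xs ih =>
    simp only [List.foldl_cons]
    rw [ih (d.insert x []) ?_ hnd.of_cons]
    · rw [PySem.Dict.keys_insert_of_not_contains _ _ (h x List.mem_cons_self)]
      simp
    · intro i hi
      rw [PySem.Dict.contains_insert]
      have hne : i ≠ x := fun he => (List.nodup_cons.mp hnd).1 (he ▸ hi)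
      simp [hne, h i (List.mem_cons_of_mem _ hi)]

theorem getD_foldl_insert_nil (l : List Int) (d : PySem.Dict Int (List Pt))
    (h : ∀ i, d.getD i [] = []) : ∀ i, (l.foldl (fun d i => d.insert i []) d).getD i [] = [] := by
  induction l generalizing d with
  | nil => exact h
  | cons x xs ih =>
    simp only [List.foldl_cons]
    refine ih _ (fun i => ?_)
    rw [PySem.Dict.getD_insert]
    split <;> simp [h]

theorem fst_mem_take_of_mem_zip {α β : Type} {lp : α × β} :
    ∀ {l1 : List α} {l2 : List β}, lp ∈ l1.zip l2 → lp.1 ∈ l1.take l2.length := by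
  intro l1
  induction l1 with
  | nil => intro l2 h; simp [List.zip] at h
  | cons a as ih =>
    intro l2 h
    cases l2 with
    | nil => simp [List.zip] at h
    | cons b bs =>
      rcases List.mem_cons.mp h with h | h
      · rw [h]; simp
      · simpa using Or.inr (ih h)

theorem labels_lt (labels : List Int) :
    ∀ l ∈ labels, l < (PySem.List.max? labels (fun x => x)).getD 0 + 1 := by
  intro l hl
  cases hm : PySem.List.max? labels (fun x => x) with
  | none =>
    rw [PySem.List.max?_eq_none_iff] at hm
    subst hm
    simp at hl
  | some m =>
    have := PySem.List.max?_isMax hm l hl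
    simp only [Option.getD_some]
    omega

theorem buckets_rel (n : Int) (lps : List (Int × Pt)) (d : PySem.Dict Int (List Pt))
    (bs : List (List Pt)) (hmem : ∀ lp ∈ lps, 0 ≤ lp.1 ∧ lp.1 < n)
    (hkeys : d.keys = PySem.List.pyRange 0 n) (hlen : bs.length = n.toNat)
    (hget : ∀ i : Int, 0 ≤ i → d.getD i [] = PySem.List.pyGetD bs i []) :
    (lps.foldl (fun d lp => d.modify lp.1 [] (fun ps => ps ++ [lp.2])) d).keys = PySem.List.pyRange 0 n ∧
    (∀ i : Int, 0 ≤ i →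
      (lps.foldl (fun d lp => d.modify lp.1 [] (fun ps => ps ++ [lp.2])) d).getD i [] =
        PySem.List.pyGetD
          (lps.foldl (fun bs lp => PySem.List.pySetD bs lp.1 (PySem.List.pyGetD bs lp.1 [] ++ [lp.2])) bs) i []) := by
  induction lps generalizing d bs with
  | nil => exact ⟨hkeys, fun i hi => hget i hi⟩
  | cons lp lps ih =>
    obtain ⟨hl0, hln⟩ := hmem lp List.mem_cons_self
    have hcont : d.contains lp.1 = true := by
      rw [PySem.Dict.contains_iff_mem_keys, hkeys, PySem.List.mem_pyRange_one]
      exact ⟨hl0, hln⟩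
    simp only [List.foldl_cons]
    refine ih (d.modify lp.1 [] (fun ps => ps ++ [lp.2])) _
      (fun q hq => hmem q (List.mem_cons_of_mem _ hq)) ?_ ?_ ?_
    · rw [PySem.Dict.keys_modify, PySem.Dict.keys_insert_of_contains _ _ hcont, hkeys]
    · rw [PySem.List.length_pySetD, hlen]
    · intro i hi
      rw [PySem.Dict.getD_modify]
      have hlnat : lp.1 = ((lp.1.toNat : Nat) : Int) := (Int.toNat_of_nonneg hl0).symm
      have hinat : i = ((i.toNat : Nat) : Int) := (Int.toNat_of_nonneg hi).symm
      rw [hlnat, hinat, PySem.List.pyGetD_pySetD_natCast bs lp.1.toNat i.toNat _ [] (by omega)]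
      rw [← hlnat, ← hinat]
      split
      · rename_i heq
        rw [if_pos (by omega), hget lp.1 hl0]
      · rename_i hne
        rw [if_neg (by omega), hget i hi]

theorem clusters_base (labels : List Int) (places : List Pt)
    (hl : ∀ l ∈ labels.take places.length, 0 ≤ l) :
    (clustersOf labels places).keys =
      PySem.List.pyRange 0 ((PySem.List.max? labels (fun x => x)).getD 0 + 1) ∧
    (∀ i : Int, 0 ≤ i →
      (clustersOf labels places).getD i [] =
        PySem.List.pyGetD (bucketsOf labels places ((PySem.List.max? labels (fun x => x)).getD 0 + 1)) i []) :=
  buckets_rel ((PySem.List.max? labels (fun x => x)).getD 0 + 1) (labels.zip places)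
    ((PySem.List.pyRange 0 ((PySem.List.max? labels (fun x => x)).getD 0 + 1)).foldl
      (fun d i => d.insert i []) PySem.Dict.empty)
    (List.replicate ((PySem.List.max? labels (fun x => x)).getD 0 + 1).toNat [])
    (fun lp hlp => ⟨hl lp.1 (fst_mem_take_of_mem_zip hlp),
      labels_lt labels lp.1 (List.take_subset _ _ (fst_mem_take_of_mem_zip hlp))⟩)
    (by
      rw [keys_foldl_insert_nil _ _ (fun i _ => PySem.Dict.contains_empty i)
        (PySem.List.nodup_pyRange_one _ _)]
      rfl)
    (by simp)
    (fun i hi => by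
      rw [getD_foldl_insert_nil _ _ (fun i => by simp [PySem.Dict.getD_empty]) i]
      rw [PySem.List.pyGetD_of_nonneg _ _ hi]
      simp [List.getD])

-- dfsB unrolled: it is the fold of the per-combination scan over the lexicographic
-- combinations of the remaining cluster indexes
theorem dfsB_eq_fold (buckets : List (List Pt)) (pts : List String) (m : Nat) :
    ∀ (i remaining : Nat) (combined : List Pt) (seen : PySem.Set String)
      (acc : List (List Pt)), buckets.length - i ≤ m →
    dfsB buckets pts i remaining combined seen acc =
      (pyCombinations (List.range' i (buckets.length - i)) remaining).foldl
        (fun acc combo =>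
          let st := combo.foldl (fun st j => (buckets.getD j []).foldl bScanStep st) (combined, seen)
          if pts.all (fun t => st.2.contains t) then acc ++ [st.1] else acc) acc := by
  induction m with
  | zero =>
    intro i remaining combined seen acc hm
    rw [dfsB]
    rcases Nat.eq_zero_or_pos remaining with h0 | h0
    · subst h0
      simp [pyCombinations]
    · rw [if_neg (by omega), dif_pos (by omega)]
      rw [pyCombinations_eq_nil (by simp [List.length_range']; omega)]
      rfl
  | succ m ih =>
    intro i remaining combined seen acc hm
    rw [dfsB]
    rcases Nat.eq_zero_or_pos remaining with h0 | h0
    · subst h0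
      simp [pyCombinations]
    · rw [if_neg (by omega)]
      by_cases hg : buckets.length - i < remaining
      · rw [dif_pos hg]
        rw [pyCombinations_eq_nil (by simp [List.length_range']; omega)]
        rfl
      · rw [dif_neg hg]
        have hi : i < buckets.length := by omega
        have hrange : List.range' i (buckets.length - i) =
            i :: List.range' (i + 1) (buckets.length - (i + 1)) := by
          have : buckets.length - i = (buckets.length - (i + 1)) + 1 := by omega
          rw [this, List.range'_succ]
        have hrem : remaining = (remaining - 1) + 1 := by omega
        rw [hrange, hrem]
        show dfsB buckets pts (i + 1) ((remaining - 1) + 1) combined seen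
            (dfsB buckets pts (i + 1) (remaining - 1) _ _ acc) = _
        rw [pyCombinations, List.foldl_append, List.foldl_map]
        rw [ih (i + 1) (remaining - 1) _ _ acc (by omega)]
        rw [ih (i + 1) ((remaining - 1) + 1) combined seen _ (by omega)]
        congr 1

theorem foldl_pySetD_length (lps : List (Int × Pt)) (bs : List (List Pt)) :
    (lps.foldl (fun bs lp => PySem.List.pySetD bs lp.1 (PySem.List.pyGetD bs lp.1 [] ++ [lp.2])) bs).length
      = bs.length := by
  induction lps generalizing bs with
  | nil => rfl
  | cons lp lps ih =>
    simp only [List.foldl_cons]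
    rw [ih, PySem.List.length_pySetD]

theorem length_bucketsOf (labels : List Int) (places : List Pt) (n : Int) :
    (bucketsOf labels places n).length = n.toNat := by
  unfold bucketsOf
  rw [foldl_pySetD_length]
  simp

theorem pyRange_zero_eq_map (n : Int) :
    PySem.List.pyRange 0 n 1 = (List.range n.toNat).map (fun k : Nat => (k : Int)) := by
  rw [PySem.List.pyRange_one]
  simp

theorem relst_combo (pts : List String) (LA LB : Nat → List Pt) (hL : ∀ j, LA j = LB j)
    (combo : List Nat) : ∀ {sA : List Pt × PySem.Dict String Int}
      {sB : List Pt × PySem.Set String}, RelST pts sA sB →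
    RelST pts (combo.foldl (fun st j => (LA j).foldl aStep st) sA)
      (combo.foldl (fun st j => (LB j).foldl bScanStep st) sB) := by
  induction combo with
  | nil => intro sA sB h; exact h
  | cons j js ih =>
    intro sA sB h
    simp only [List.foldl_cons]
    exact ih (hL j ▸ relst_points pts (LA j) h)

-- ===== VERDICT (by name: the statement is the Claim_ definition above) =====
theorem refine_clusters_spec : Claim_equal_refine_clusters := by
  intro labels places pts _hdom hpre
  obtain ⟨hne, hl, -⟩ := hpre
  obtain ⟨hkeys, hget⟩ := clusters_base labels places hl
  unfold Spec_refine_clusters refine_clusters refine_clusters_alt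
  simp only []
  rw [hkeys]
  rw [dfsB_eq_fold _ pts (bucketsOf labels places ((PySem.List.max? labels (fun x => x)).getD 0 + 1)).length
    0 pts.length [] PySem.Set.empty [] (by omega)]
  rw [Nat.sub_zero, length_bucketsOf, ← List.range_eq_range']
  rw [pyRange_zero_eq_map, pyCombinations_map, List.foldl_map]
  refine PySem.List.foldl_congr_mem _ _ _ _ (fun acc combo _ => ?_)
  have hrel : RelST pts (aCombo (clustersOf labels places) pts (combo.map (fun k : Nat => (k : Int))))
      (combo.foldl (fun st j =>
        ((bucketsOf labels places ((PySem.List.max? labels (fun x => x)).getD 0 + 1)).getD j []).foldl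
          bScanStep st) ([], PySem.Set.empty)) := by
    unfold aCombo
    rw [List.foldl_map]
    refine relst_combo pts _ _ (fun j => ?_) combo ⟨rfl, invTS_init pts⟩
    rw [hget (j : Int) (by positivity)]
    rw [PySem.List.pyGetD_natCast]
  obtain ⟨h1, hinv⟩ := hrel
  simp only []
  rw [invTS_final pts hinv, h1]
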